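-- pv_equiv track=rewrite | github.com/mgs95/hackerrank | practice/easy/2018/BeautifulPairs.py | beautiful_pairs
-- ===== SOURCE A (Python) =====
-- from collections import Counter
--
-- def beautiful_pairs(A, B):
--     A_nums, B_nums = set(A), set(B)
--     A_count, B_count = Counter(A), Counter(B)
--
--     same_nums = A_nums & B_nums
--     diff_nums = A_nums - B_nums
--
--     result = 0
--     for num in same_nums:
--         result += min(A_count[num], B_count[num])
--
--     if diff_nums == set():
--         return result - 1
--
--     if result == len(A):
--         return result
--
--     return result + 1
-- ===== SOURCE B (Python) =====
-- def beautiful_pairs(A, B):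
--     sa, sb = sorted(A), sorted(B)
--     n, m = len(sa), len(sb)
--     i = j = 0
--     result = 0
--     all_in = True
--     while i < n:
--         while j < m and sb[j] < sa[i]:
--             j += 1
--         if j < m and sb[j] == sa[i]:
--             result += 1
--             j += 1
--         elif i == 0 or sa[i] != sa[i - 1]:
--             all_in = False
--         i += 1
--     if all_in:
--         return result - 1
--     if result == len(A):
--         return result
--     return result + 1
-- ===== Notes on version B (the rewrite author's own statement) =====
-- stated objective: alternative
-- what changed: Replaces A's hash-based sets/Counters and sum of per-value minima with sort-then-two-pointer merge: both lists are sorted and scanned once in lockstep, counting matched pairs and detecting an unmatched distinct A value on the fly.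
import Mathlib
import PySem

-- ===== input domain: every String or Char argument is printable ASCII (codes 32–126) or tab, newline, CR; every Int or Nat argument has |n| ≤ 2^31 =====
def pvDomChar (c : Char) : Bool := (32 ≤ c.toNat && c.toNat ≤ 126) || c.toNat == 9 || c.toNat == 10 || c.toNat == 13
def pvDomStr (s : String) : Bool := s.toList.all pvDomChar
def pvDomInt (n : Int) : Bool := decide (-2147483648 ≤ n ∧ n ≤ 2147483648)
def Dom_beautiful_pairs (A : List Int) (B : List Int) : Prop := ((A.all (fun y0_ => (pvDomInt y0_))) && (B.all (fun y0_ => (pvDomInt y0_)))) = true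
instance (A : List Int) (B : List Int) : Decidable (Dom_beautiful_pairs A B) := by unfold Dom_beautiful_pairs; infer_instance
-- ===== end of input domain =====

-- B replaces A's hash sets/Counters and sum of per-value minima with a sort-then-two-pointer
-- merge over sorted copies of A and B (objective: an alternative algorithm, not claimed faster).

-- ===== PORT A =====
-- The Python iterates 'for num in same_nums' over a set; the loop only adds the terms up,
-- so the result is independent of the (unmodelled) set iteration order.
def beautiful_pairs (A : List Int) (B : List Int) : Int :=
  let A_nums : PySem.Set Int := PySem.Set.ofList A
  let B_nums : PySem.Set Int := PySem.Set.ofList B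
  let A_count := PySem.Dict.counter A
  let B_count := PySem.Dict.counter B
  let same_nums := PySem.Set.inter A_nums B_nums
  let diff_nums := PySem.Set.diff A_nums B_nums
  let result : Int :=
    same_nums.foldl (fun r num => r + min (A_count.getD num 0) (B_count.getD num 0)) 0
  if PySem.Set.equal diff_nums PySem.Set.empty then result - 1
  else if result = (A.length : Int) then result
  else result + 1

-- ===== PORT B =====
-- Source B's inner 'while j < m and sb[j] < sa[i]' loop: advance j past the elements below x
def bpSkip (x : Int) : List Int → List Int
  | [] => []
  | y :: ys => if y < x then bpSkip x ys else y :: ys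

-- Source B's outer 'while i < n' loop: the index i over sa becomes structural recursion over the
-- sorted list, carrying the previous element sa[i-1] (none at i = 0) for the elif test
def bpMerge : List Int → List Int → Option Int → Int → Bool → Int × Bool
  | [], _, _, res, allin => (res, allin)
  | x :: rest, sb, prev, res, allin =>
    match bpSkip x sb with
    | y :: ys =>
      if y = x then bpMerge rest ys (some x) (res + 1) allin
      else if prev = some x then bpMerge rest (y :: ys) (some x) res allin
      else bpMerge rest (y :: ys) (some x) res false
    | [] =>
      if prev = some x then bpMerge rest [] (some x) res allin
      else bpMerge rest [] (some x) res false

def beautiful_pairs_alt (A : List Int) (B : List Int) : Int :=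
  let sa := PySem.List.sorted A (fun x => x) false
  let sb := PySem.List.sorted B (fun x => x) false
  let rb := bpMerge sa sb none 0 true
  if rb.2 then rb.1 - 1
  else if rb.1 = (A.length : Int) then rb.1
  else rb.1 + 1

-- ===== PRECONDITION & SPEC =====
def Spec_beautiful_pairs (A : List Int) (B : List Int) (out : Int) : Prop := out = beautiful_pairs_alt A B
instance (A : List Int) (B : List Int) (out : Int) : Decidable (Spec_beautiful_pairs A B out) := by unfold Spec_beautiful_pairs; infer_instance

-- ===== CLAIM (what is proved, stated in full; the proofs are below) =====
def Claim_equal_beautiful_pairs : Prop := ∀ (A : List Int) (B : List Int), Dom_beautiful_pairs A B → Spec_beautiful_pairs A B (beautiful_pairs A B)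

-- ===== LEMMAS AND PROOFS =====

-- boolean all respects pointwise equality on members
theorem pvAllCongrMem {α : Type} (p q : α → Bool) : ∀ (l : List α),
    (∀ a ∈ l, p a = q a) → l.all p = l.all q := by
  intro l
  induction l with
  | nil => intro _; rfl
  | cons a t ih =>
    intro h
    simp only [List.all_cons, h a (by simp), ih (fun b hb => h b (by simp [hb]))]

-- bpSkip drops only elements below x: counts of values ≥ x are unchanged
theorem bpSkip_count (x v : Int) (hxv : x ≤ v) : ∀ (sb : List Int),
    (bpSkip x sb).count v = sb.count v := by
  intro sb
  induction sb with
  | nil => rfl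
  | cons y ys ih =>
    by_cases h : y < x
    · have hne : ¬ (y = v) := by omega
      have hne' : ¬ (v = y) := by omega
      simp [bpSkip, h, ih, List.count_cons, hne, hne']
    · simp [bpSkip, h]

-- membership of values ≥ x is unchanged by bpSkip
theorem bpSkip_mem (x v : Int) (hxv : x ≤ v) (sb : List Int) :
    v ∈ bpSkip x sb ↔ v ∈ sb := by
  rw [← List.count_pos_iff, ← List.count_pos_iff, bpSkip_count x v hxv]

-- bpSkip returns a suffix, hence sortedness is preserved
theorem bpSkip_suffix (x : Int) : ∀ (sb : List Int), (bpSkip x sb) <:+ sb := by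
  intro sb
  induction sb with
  | nil => exact List.suffix_refl _
  | cons y ys ih =>
    by_cases h : y < x
    · simpa [bpSkip, h] using ih.trans (List.suffix_cons y ys)
    · simp [bpSkip, h]

theorem bpSkip_pairwise (x : Int) (sb : List Int) (h : sb.Pairwise (· ≤ ·)) :
    (bpSkip x sb).Pairwise (· ≤ ·) :=
  h.sublist (bpSkip_suffix x sb).sublist

-- the head of bpSkip's result is ≥ x
theorem bpSkip_head_ge (x : Int) : ∀ (sb : List Int) (y : Int) (ys : List Int),
    bpSkip x sb = y :: ys → x ≤ y := by
  intro sb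
  induction sb with
  | nil => intro y ys h; simp [bpSkip] at h
  | cons z zs ih =>
    intro y ys h
    by_cases hz : z < x
    · rw [bpSkip, if_pos hz] at h; exact ih y ys h
    · rw [bpSkip, if_neg hz] at h
      cases h; omega

-- x itself survives bpSkip: x ∈ sb iff bpSkip's head is x (sb sorted)
theorem bpSkip_not_mem (x : Int) (sb : List Int) (hs : sb.Pairwise (· ≤ ·))
    (h : ∀ ys, bpSkip x sb ≠ x :: ys) : x ∉ sb := by
  intro hx
  rw [← bpSkip_mem x x le_rfl] at hx
  cases hbs : bpSkip x sb with
  | nil => rw [hbs] at hx; simp at hx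
  | cons y ys =>
    have hy : x ≤ y := bpSkip_head_ge x sb y ys hbs
    have hyx : y ≠ x := fun he => h ys (he ▸ hbs)
    rw [hbs] at hx
    rcases List.mem_cons.mp hx with he | hm
    · omega
    · have hp : (y :: ys).Pairwise (· ≤ ·) := hbs ▸ bpSkip_pairwise x sb hs
      have := (List.pairwise_cons.mp hp).1 x hm
      omega

-- intersection only depends on counts of the left-hand support
theorem inter_count_congr (s t₁ t₂ : Multiset Int)
    (h : ∀ v ∈ s, t₁.count v = t₂.count v) : s ∩ t₁ = s ∩ t₂ := by
  apply Multiset.ext.mpr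
  intro v
  rw [Multiset.count_inter, Multiset.count_inter]
  by_cases hv : v ∈ s
  · rw [h v hv]
  · rw [Multiset.count_eq_zero_of_notMem hv]
    simp

-- the count of B's merge is the multiset-intersection size
theorem bpMerge_fst (sa : List Int) : ∀ (sb : List Int) (prev : Option Int) (res : Int)
    (allin : Bool), sa.Pairwise (· ≤ ·) → sb.Pairwise (· ≤ ·) →
    (bpMerge sa sb prev res allin).1
      = res + (((sa : Multiset Int)) ∩ ((sb : Multiset Int))).card := by
  induction sa with
  | nil => intro sb prev res allin _ _; simp [bpMerge]
  | cons x rest ih =>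
    intro sb prev res allin hsa hsb
    obtain ⟨hx, hrest⟩ := List.pairwise_cons.mp hsa
    have hcong : ((x :: rest : List Int) : Multiset Int) ∩ (sb : Multiset Int)
        = ((x :: rest : List Int) : Multiset Int) ∩ ((bpSkip x sb : List Int) : Multiset Int) := by
      apply inter_count_congr
      intro v hv
      have hxv : x ≤ v := by
        rcases List.mem_cons.mp hv with he | hm
        · omega
        · exact hx v hm
      rw [Multiset.coe_count, Multiset.coe_count, bpSkip_count x v hxv]
    have hskp : (bpSkip x sb).Pairwise (· ≤ ·) := bpSkip_pairwise x sb hsb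
    cases hbs : bpSkip x sb with
    | nil =>
      have hz : ((x :: rest : List Int) : Multiset Int) ∩ (sb : Multiset Int) = 0 := by
        rw [hcong, hbs]; simp
      by_cases hp : prev = some x
      · rw [bpMerge, hbs, if_pos hp]
        simp [ih [] (some x) res allin hrest List.Pairwise.nil, hz]
      · rw [bpMerge, hbs, if_neg hp]
        simp [ih [] (some x) res false hrest List.Pairwise.nil, hz]
    | cons y ys =>
      rw [hbs] at hskp
      obtain ⟨hy, hys⟩ := List.pairwise_cons.mp hskp
      by_cases hyx : y = x
      · subst hyx
        have hmem : y ∈ ((y :: ys : List Int) : Multiset Int) := by simp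
        have hinter : ((y :: rest : List Int) : Multiset Int) ∩ ((y :: ys : List Int) : Multiset Int)
            = y ::ₘ (((rest : List Int) : Multiset Int) ∩ (((y :: ys : List Int) : Multiset Int).erase y)) := by
          rw [← Multiset.cons_coe]
          exact Multiset.cons_inter_of_pos _ hmem
        rw [bpMerge, hbs]
        simp only [if_true]
        rw [ih ys (some y) (res + 1) allin hrest hys, hcong, hbs, hinter]
        rw [← Multiset.cons_coe, Multiset.erase_cons_head, Multiset.card_cons]
        push_cast; ring
      · have hxsb2 : x ∉ sb :=
          bpSkip_not_mem x sb hsb (fun zs he => hyx (by rw [hbs] at he; cases he; rfl))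
        have hnm : x ∉ (y :: ys : List Int) := by
          rw [← hbs]
          exact fun hm => hxsb2 ((bpSkip_mem x x le_rfl sb).mp hm)
        have hnm' : x ∉ ((y :: ys : List Int) : Multiset Int) := by simpa using hnm
        have hinter : ((x :: rest : List Int) : Multiset Int) ∩ ((y :: ys : List Int) : Multiset Int)
            = ((rest : List Int) : Multiset Int) ∩ ((y :: ys : List Int) : Multiset Int) := by
          rw [← Multiset.cons_coe]
          exact Multiset.cons_inter_of_neg _ hnm'
        rw [hcong, hbs, hinter]
        by_cases hp : prev = some x
        · rw [bpMerge, hbs]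
          simp only [if_neg hyx, if_pos hp]
          exact ih (y :: ys) (some x) res allin hrest hskp
        · rw [bpMerge, hbs]
          simp only [if_neg hyx, if_neg hp]
          exact ih (y :: ys) (some x) res false hrest hskp

-- the flag of B's merge: true iff it started true and every element of sa occurs in sb
-- (the prev marker stands for an element ≤ everything still to come)
theorem bpMerge_snd (sa : List Int) : ∀ (sb : List Int) (prev : Option Int) (res : Int)
    (allin : Bool), sa.Pairwise (· ≤ ·) → sb.Pairwise (· ≤ ·) →
    (∀ p, prev = some p → ∀ v ∈ sa, p ≤ v) →
    (bpMerge sa sb prev res allin).2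
      = (allin && sa.all (fun v => decide (v ∈ sb) || decide (prev = some v))) := by
  induction sa with
  | nil => intro sb prev res allin _ _ _; simp [bpMerge]
  | cons x rest ih =>
    intro sb prev res allin hsa hsb hprev
    obtain ⟨hx, hrest⟩ := List.pairwise_cons.mp hsa
    have hprev' : ∀ p, prev = some p → p ≤ x := fun p hp => hprev p hp x (by simp)
    have hnotv : ∀ v ∈ rest, v ≠ x → ¬ prev = some v := by
      intro v hv hvx hp
      have h1 := hprev v hp x (by simp)
      have h2 := hx v hv
      omega
    have hmemx : ∀ v, x ≤ v → (v ∈ bpSkip x sb ↔ v ∈ sb) := fun v hv => bpSkip_mem x v hv sb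
    have hskp : (bpSkip x sb).Pairwise (· ≤ ·) := bpSkip_pairwise x sb hsb
    have hnext : ∀ v ∈ x :: rest, x ≤ v := by
      intro v hv
      rcases List.mem_cons.mp hv with he | hm
      · omega
      · exact hx v hm
    cases hbs : bpSkip x sb with
    | nil =>
      have hxnm : x ∉ sb := by
        rw [← hmemx x le_rfl, hbs]; simp
      have hrnm : ∀ v ∈ rest, v ∉ sb := by
        intro v hv hmem
        rw [← hmemx v (hx v hv), hbs] at hmem; simp at hmem
      by_cases hp : prev = some x
      · rw [bpMerge, hbs, if_pos hp,
          ih [] (some x) res allin hrest List.Pairwise.nil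
            (fun p he => by cases he; exact hx)]
        congr 1
        simp only [List.all_cons, hxnm, decide_false, Bool.false_or, hp,
          decide_true, Bool.true_or, Bool.true_and]
        apply pvAllCongrMem
        intro v hv
        by_cases hvx : v = x
        · simp [hvx, hp, hxnm]
        · simp [hrnm v hv, hvx, hnotv v hv hvx]
      · rw [bpMerge, hbs, if_neg hp,
          ih [] (some x) res false hrest List.Pairwise.nil
            (fun p he => by cases he; exact hx)]
        simp [hxnm, hp]
    | cons y ys =>
      rw [hbs] at hskp
      by_cases hyx : y = x
      · subst hyx
        -- match: y occurs in sb, one copy consumed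
        have hxin : y ∈ sb := by rw [← hmemx y le_rfl, hbs]; simp
        rw [bpMerge, hbs]
        simp only [eq_self_iff_true, if_true]
        rw [ih ys (some y) (res + 1) allin hrest (List.pairwise_cons.mp hskp).2
            (fun p he => by cases he; exact hx)]
        congr 1
        simp only [List.all_cons, hxin, decide_true, Bool.true_or, Bool.true_and]
        apply pvAllCongrMem
        intro v hv
        by_cases hvx : v = y
        · simp [hvx, hxin]
        · have hvm : v ∈ ys ↔ v ∈ sb := by
            have h1 : v ∈ (y :: ys : List Int) ↔ v ∈ sb := hbs ▸ hmemx v (hx v hv)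
            rw [← h1]; simp [hvx]
          have hvx' : ¬ (y = v) := fun h => hvx h.symm
          simp [hvm, hvx', hnotv v hv hvx]
      · have hxnm : x ∉ sb :=
          bpSkip_not_mem x sb hsb (fun zs he => hyx (by cases hbs ▸ he; rfl))
        by_cases hp : prev = some x
        · rw [bpMerge, hbs]
          simp only [if_neg hyx, if_pos hp]
          rw [ih (y :: ys) (some x) res allin hrest hskp
              (fun p he => by cases he; exact hx)]
          congr 1
          simp only [List.all_cons, hxnm, decide_false, Bool.false_or, hp,
            decide_true, Bool.true_and]
          apply pvAllCongrMem
          intro v hv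
          have hvm : v ∈ (y :: ys : List Int) ↔ v ∈ sb := hbs ▸ hmemx v (hx v hv)
          by_cases hvx : v = x
          · simp [hvx, hp, hvm, hxnm]
          · simp [hvm, hvx, hnotv v hv hvx, hp]
        · rw [bpMerge, hbs]
          simp only [if_neg hyx, if_neg hp]
          rw [ih (y :: ys) (some x) res false hrest hskp
              (fun p he => by cases he; exact hx)]
          simp [hxnm, hp]

-- A's sum over the set intersection is the multiset-intersection size too
theorem sumA_eq (A B : List Int) :
    (PySem.Set.inter (PySem.Set.ofList A) (PySem.Set.ofList B)).foldl
      (fun r num => r + min ((PySem.Dict.counter A).getD num 0) ((PySem.Dict.counter B).getD num 0)) 0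
      = (((A : Multiset Int)) ∩ ((B : Multiset Int))).card := by
  rw [PySem.List.foldl_add]
  have hmap : (PySem.Set.inter (PySem.Set.ofList A) (PySem.Set.ofList B)).map
      (fun num => min ((PySem.Dict.counter A).getD num 0) ((PySem.Dict.counter B).getD num 0))
      = (PySem.Set.inter (PySem.Set.ofList A) (PySem.Set.ofList B)).map
      (fun num => ((min (A.count num) (B.count num) : Nat) : Int)) := by
    apply List.map_congr_left
    intro v _
    rw [PySem.Dict.getD_counter, PySem.Dict.getD_counter, Nat.cast_min]
  rw [hmap]
  have hnd : (PySem.Set.inter (PySem.Set.ofList A) (PySem.Set.ofList B)).Nodup :=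
    List.Nodup.filter _ (PySem.Set.nodup_ofList A)
  rw [← List.sum_toFinset _ hnd]
  have htf : (PySem.Set.inter (PySem.Set.ofList A) (PySem.Set.ofList B)).toFinset
      = (((A : Multiset Int)) ∩ ((B : Multiset Int))).toFinset := by
    apply Finset.ext
    intro v
    simp only [List.mem_toFinset, Multiset.mem_toFinset, Multiset.mem_inter,
      PySem.Set.inter, List.mem_filter, PySem.Set.contains, Multiset.mem_coe]
    constructor
    · rintro ⟨h1, h2⟩
      exact ⟨(PySem.Set.mem_ofList A v).mp h1, by
        simpa [PySem.Set.mem_ofList] using h2⟩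
    · rintro ⟨h1, h2⟩
      exact ⟨(PySem.Set.mem_ofList A v).mpr h1, by
        simpa [PySem.Set.mem_ofList] using h2⟩
  rw [htf]
  have := Multiset.toFinset_sum_count_eq (((A : Multiset Int)) ∩ ((B : Multiset Int)))
  rw [← this]
  push_cast
  rw [zero_add]
  apply Finset.sum_congr rfl
  intro v _
  rw [Multiset.count_inter, Multiset.coe_count, Multiset.coe_count, Nat.cast_min]

-- both "all of A occurs in B" flags agree
theorem flagA_iff (A B : List Int) :
    PySem.Set.equal (PySem.Set.diff (PySem.Set.ofList A) (PySem.Set.ofList B)) PySem.Set.empty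
      = A.all (fun x => decide (x ∈ B)) := by
  by_cases h : ∀ x ∈ A, x ∈ B
  · have h1 : PySem.Set.diff (PySem.Set.ofList A) (PySem.Set.ofList B) = [] := by
      simp only [PySem.Set.diff, List.filter_eq_nil_iff]
      intro v hv
      have : v ∈ B := h v ((PySem.Set.mem_ofList A v).mp hv)
      simp [PySem.Set.contains, PySem.Set.mem_ofList, this]
    rw [h1]
    have h2 : A.all (fun x => decide (x ∈ B)) = true := by
      simp only [List.all_eq_true, decide_eq_true_eq]
      exact h
    rw [h2]
    rfl
  · obtain ⟨x, hxA, hxB⟩ : ∃ x ∈ A, x ∉ B := by simpa using h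
    have hmem : x ∈ PySem.Set.diff (PySem.Set.ofList A) (PySem.Set.ofList B) := by
      simp only [PySem.Set.diff, List.mem_filter]
      refine ⟨(PySem.Set.mem_ofList A x).mpr hxA, ?_⟩
      simp [PySem.Set.contains, PySem.Set.mem_ofList, hxB]
    have h1 : PySem.Set.equal (PySem.Set.diff (PySem.Set.ofList A) (PySem.Set.ofList B))
        PySem.Set.empty = false := by
      have hsub : (PySem.Set.diff (PySem.Set.ofList A) (PySem.Set.ofList B)).all
          (fun y => PySem.Set.contains (PySem.Set.empty : PySem.Set Int) y) = false :=
        List.all_eq_false.mpr ⟨x, hmem, by simp [PySem.Set.contains, PySem.Set.empty]⟩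
      simp only [PySem.Set.equal, PySem.Set.issubset]
      rw [hsub]
      rfl
    have h2 : A.all (fun x => decide (x ∈ B)) = false :=
      List.all_eq_false.mpr ⟨x, hxA, by simpa using hxB⟩
    rw [h1, h2]

-- ===== VERDICT (by name: the statement is the Claim_ definition above) =====
theorem beautiful_pairs_spec : Claim_equal_beautiful_pairs := by
  intro A B _
  unfold Spec_beautiful_pairs beautiful_pairs beautiful_pairs_alt
  have hpa : (PySem.List.sorted A (fun x => x) false).Pairwise (· ≤ ·) :=
    PySem.List.sorted_pairwise A (fun x => x)
  have hpb : (PySem.List.sorted B (fun x => x) false).Pairwise (· ≤ ·) :=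
    PySem.List.sorted_pairwise B (fun x => x)
  have hca : ((PySem.List.sorted A (fun x => x) false : List Int) : Multiset Int)
      = ((A : List Int) : Multiset Int) :=
    Multiset.coe_eq_coe.mpr (PySem.List.sorted_perm A (fun x => x) false)
  have hcb : ((PySem.List.sorted B (fun x => x) false : List Int) : Multiset Int)
      = ((B : List Int) : Multiset Int) :=
    Multiset.coe_eq_coe.mpr (PySem.List.sorted_perm B (fun x => x) false)
  have hres := bpMerge_fst (PySem.List.sorted A (fun x => x) false)
    (PySem.List.sorted B (fun x => x) false) none 0 true hpa hpb
  rw [hca, hcb, zero_add] at hres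
  have hflag := bpMerge_snd (PySem.List.sorted A (fun x => x) false)
    (PySem.List.sorted B (fun x => x) false) none 0 true hpa hpb (by simp)
  have hall : (PySem.List.sorted A (fun x => x) false).all
      (fun v => decide (v ∈ PySem.List.sorted B (fun x => x) false)
        || decide ((none : Option Int) = some v))
      = A.all (fun x => decide (x ∈ B)) := by
    have h1 : (fun (v : Int) => decide (v ∈ PySem.List.sorted B (fun x => x) false)
          || decide ((none : Option Int) = some v))
        = (fun (v : Int) => decide (v ∈ B)) :=
      funext (fun v => by simp [PySem.List.mem_sorted])
    rw [h1]
    exact (PySem.List.sorted_perm A (fun x => x) false).all_eq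
  rw [Bool.true_and, hall] at hflag
  simp only [sumA_eq, hres, hflag, flagA_iff]
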